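-- pv_equiv track=rewrite | github.com/tensorstrike28/python_basics | letter_indices.py | letter_indices
-- ===== SOURCE A (Python) =====
-- def letter_indices(str_input):
--     index_dict = {}
--     for i in range(len(str_input)):
--         if str_input[i] in index_dict:
--             index_dict[str_input[i]].append(i)
--         else:
--             index_dict[str_input[i]] = [i]
--     return index_dict
-- ===== SOURCE B (Python) =====
-- def letter_indices(str_input):
--     uniq = list(dict.fromkeys(str_input))
--     return {ch: [i for i, c in enumerate(str_input) if c == ch] for ch in uniq}
-- ===== Notes on version B (the rewrite author's own statement) =====
-- stated objective: alternative
-- what changed: A builds the dict in one accumulating pass appending each index as it goes; B first extracts the distinct characters in first-appearance order (dict.fromkeys) and then builds each character's index list by a separate enumerate-scan of the whole string.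
import Mathlib
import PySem

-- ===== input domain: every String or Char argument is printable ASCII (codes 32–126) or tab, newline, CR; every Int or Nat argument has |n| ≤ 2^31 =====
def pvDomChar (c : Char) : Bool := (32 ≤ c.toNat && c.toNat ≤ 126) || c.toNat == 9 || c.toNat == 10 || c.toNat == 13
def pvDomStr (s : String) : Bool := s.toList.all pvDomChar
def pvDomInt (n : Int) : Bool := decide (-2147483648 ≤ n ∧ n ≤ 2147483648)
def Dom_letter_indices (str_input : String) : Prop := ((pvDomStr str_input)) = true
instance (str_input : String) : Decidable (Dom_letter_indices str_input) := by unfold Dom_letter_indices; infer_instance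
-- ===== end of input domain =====

-- B replaces A's single accumulating dict pass by: dedup the characters in first-appearance
-- order, then one enumerate-scan of the whole string per distinct character (objective: alternative).

-- ===== PORT A =====
-- A: for i in range(len(s)): append i to index_dict[s[i]] (create [i] on first sight); return the dict.
-- Python's s[i] is a one-char string, modelled as the list of singleton strings.
def letter_indices (str_input : String) : List (String × List Int) :=
  let chars : List String := str_input.toList.map (fun c => String.ofList [c])
  ((PySem.List.pyRange 0 (chars.length : Int) 1).foldl
    (fun d i =>
      let ch := PySem.List.pyGetD chars i ""
      if d.contains ch then d.insert ch (d.getD ch [] ++ [i])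
      else d.insert ch [i])
    (PySem.Dict.empty : PySem.Dict String (List Int))).items

-- ===== PORT B =====
-- B: uniq = list(dict.fromkeys(s)); {ch: [i for i, c in enumerate(s) if c == ch] for ch in uniq}
def letter_indices_alt (str_input : String) : List (String × List Int) :=
  let chars : List String := str_input.toList.map (fun c => String.ofList [c])
  (PySem.List.dedup chars).map (fun ch =>
    (ch, ((PySem.List.enumerate chars 0).filter (fun p => p.2 == ch)).map (·.1)))

-- ===== PRECONDITION & SPEC =====
def Spec_letter_indices (str_input : String) (out : List (String × List Int)) : Prop := out = letter_indices_alt str_input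
instance (str_input : String) (out : List (String × List Int)) : Decidable (Spec_letter_indices str_input out) := by unfold Spec_letter_indices; infer_instance

-- ===== CLAIM (what is proved, stated in full; the proofs are below) =====
def Claim_equal_letter_indices : Prop := ∀ (str_input : String), Dom_letter_indices str_input → Spec_letter_indices str_input (letter_indices str_input)

-- ===== LEMMAS AND PROOFS =====

-- A's branching step is exactly a Python-dict "modify": d[ch] = d.get(ch, []) + [i].
theorem step_eq_modify (d : PySem.Dict String (List Int)) (ch : String) (i : Int) :
    (if d.contains ch then d.insert ch (d.getD ch [] ++ [i]) else d.insert ch [i])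
      = d.modify ch [] (· ++ [i]) := by
  by_cases h : d.contains ch
  · simp [h, PySem.Dict.modify]
  · simp only [Bool.not_eq_true] at h
    simp [h, PySem.Dict.modify, PySem.Dict.getD_of_not_contains d [] h]

-- A's dict, folded over the swapped enumerate pairs (ch, i) with the modify step.
theorem letter_indices_as_modify_fold (chars : List String) :
    (PySem.List.pyRange 0 (chars.length : Int) 1).foldl
      (fun d i =>
        let ch := PySem.List.pyGetD chars i ""
        if d.contains ch then d.insert ch (d.getD ch [] ++ [i])
        else d.insert ch [i])
      (PySem.Dict.empty : PySem.Dict String (List Int))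
    = ((PySem.List.enumerate chars 0).map Prod.swap).foldl
        (fun d p => d.modify p.1 [] (· ++ [p.2])) PySem.Dict.empty := by
  have h1 : (PySem.List.pyRange 0 (chars.length : Int) 1).foldl
      (fun d i =>
        let ch := PySem.List.pyGetD chars i ""
        if d.contains ch then d.insert ch (d.getD ch [] ++ [i])
        else d.insert ch [i])
      (PySem.Dict.empty : PySem.Dict String (List Int))
    = ((PySem.List.pyRange 0 (chars.length : Int) 1).map
        (fun j => (j, PySem.List.pyGetD chars j ""))).foldl
        (fun d p =>
          if d.contains p.2 then d.insert p.2 (d.getD p.2 [] ++ [p.1])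
          else d.insert p.2 [p.1])
        PySem.Dict.empty := by
    rw [List.foldl_map]
  rw [h1]
  have h2 : ((PySem.List.pyRange 0 (chars.length : Int) 1).map
        (fun j => (j, PySem.List.pyGetD chars j ""))) = PySem.List.enumerate chars 0 := by
    rw [PySem.List.enumerate_eq_map_pyRange chars ""]
    simp
  rw [h2, List.foldl_map]
  apply PySem.List.foldl_congr_mem
  intro acc x _
  exact step_eq_modify acc x.2 x.1

theorem letter_indices_proof (str_input : String) :
    letter_indices str_input = letter_indices_alt str_input := by
  unfold letter_indices letter_indices_alt
  dsimp only
  set chars : List String := str_input.toList.map (fun c => String.ofList [c]) with hchars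
  rw [letter_indices_as_modify_fold chars]
  set l : List (String × Int) := (PySem.List.enumerate chars 0).map Prod.swap with hl
  have hnodup : ((l.foldl (fun d p => d.modify p.1 [] (· ++ [p.2])) PySem.Dict.empty).keys).Nodup :=
    PySem.Dict.nodup_keys_foldl_modify_key l Prod.fst [] (fun _ p => (· ++ [p.2]))
      PySem.Dict.empty (by simp)
  rw [PySem.Dict.items_eq_map_keys _ hnodup []]
  have hkeys : (l.foldl (fun d p => d.modify p.1 [] (· ++ [p.2])) PySem.Dict.empty).keys
      = PySem.List.dedup chars := by
    rw [PySem.Dict.keys_foldl_modify_key l Prod.fst [] (fun _ p => (· ++ [p.2])) PySem.Dict.empty]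
    have : l.map Prod.fst = chars := by
      simp [hl, List.map_map, Function.comp_def, PySem.List.map_snd_enumerate]
    simp [this, PySem.Dict.keys_empty, PySem.Set.update_nil_left]
  rw [hkeys]
  apply List.map_congr_left
  intro ch _
  have hval := PySem.Dict.getD_foldl_modify_append l PySem.Dict.empty ch
  simp only [PySem.Dict.getD_empty, List.nil_append] at hval
  rw [hval, hl]
  simp [List.filter_map, List.map_map, Function.comp_def]

-- ===== VERDICT (by name: the statement is the Claim_ definition above) =====
theorem letter_indices_spec : Claim_equal_letter_indices := by
  intro s _
  exact letter_indices_proof s
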